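-- pv_equiv track=rewrite | github.com/scmschmidt/trento_checks_for_supportconfig | src/tcsc_supportfiles.py | _get_virtblock
-- ===== SOURCE A (Python) =====
-- from typing import List, Dict, Tuple
--
-- def _get_virtblock(basic_env_txt: List[str]) -> Dict[str, str]:
--     """Extracts virtualization information from basic-environment.txt
--     provided as list of lines and returns them as dictionary."""
--
--     try:
--         virtulization = {}
--         toggle = False
--         for line in basic_env_txt:
--             if toggle and line.startswith('#==['):
--                 break
--             if not toggle and line.startswith('# Virtualization'):
--                 toggle = True
--                 continue
--             if toggle and ':' in line:
--                 k, v = line.split(':')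
--                 virtulization[k.strip()] = v.strip()
--     except:
--         return {}
--     return virtulization
-- ===== SOURCE B (Python) =====
-- def _get_virtblock(basic_env_txt):
--     """Extracts virtualization information from basic-environment.txt
--     provided as list of lines and returns them as dictionary."""
--     # Phase 1: locate the section header.
--     header = next((i for i, line in enumerate(basic_env_txt)
--                    if line.startswith('# Virtualization')), None)
--     if header is None:
--         return {}
--     # Phase 2: collect the section body up to the next '#==[' boundary.
--     section = []
--     for line in basic_env_txt[header + 1:]:
--         if line.startswith('#==['):
--             break
--         section.append(line)
--     # Phase 3: parse the 'key: value' lines of the body.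
--     return {k.strip(): v.strip()
--             for k, v in (line.split(':', 1) for line in section if ':' in line)}
-- ===== Notes on version B (the rewrite author's own statement) =====
-- stated objective: simpler
-- what changed: Replaces A's single toggle-state loop (with try/except around the whole parse) by three phases: find the '# Virtualization' header index, collect the section body up to the next '#==[' boundary, then build the dict from the body's 'key: value' lines with split(':', 1).
-- intended difference: On inputs whose section body contains a line with two or more colons, A's bare unpacking of split(':') raises and its blanket except returns {} discarding all parsed pairs, while B's split(':', 1) parses every 'key: value' line (value keeps its colons), which is the intended parse of such a section. — e.g. on _get_virtblock(["# Virtualization", "a:b:c"]): A returns [], B returns [("a", "b:c")]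
import Mathlib
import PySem

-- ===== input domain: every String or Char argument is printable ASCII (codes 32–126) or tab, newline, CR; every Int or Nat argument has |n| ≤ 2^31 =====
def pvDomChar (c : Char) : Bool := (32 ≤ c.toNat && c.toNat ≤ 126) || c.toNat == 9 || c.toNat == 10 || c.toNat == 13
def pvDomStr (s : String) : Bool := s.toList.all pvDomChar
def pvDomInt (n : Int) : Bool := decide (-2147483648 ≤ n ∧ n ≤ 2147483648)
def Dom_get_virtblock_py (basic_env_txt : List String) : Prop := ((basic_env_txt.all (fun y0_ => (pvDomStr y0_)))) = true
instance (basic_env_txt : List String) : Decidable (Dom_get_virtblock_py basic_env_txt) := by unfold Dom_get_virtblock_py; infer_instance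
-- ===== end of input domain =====

-- B replaces A's toggle-state loop by three phases (find header, take body, parse with split(':',1));
-- on section lines with ≥2 colons A discards everything and returns {} (try/except) while B parses them — stated as D_.


-- ===== PORT A =====
-- A's loop: state = (dict, toggle); 'k, v = line.split(':')' raises unless the split has
-- exactly two fields, hence the catch-all match arm returning [] ('except: return {}').
def pvGoA : List String → PySem.Dict String String → Bool → List (String × String)
  | [], d, _ => d.items
  | line :: rest, d, toggle =>
    if toggle && PySem.Str.startswith line "#==[" then d.items
    else if (!toggle) && PySem.Str.startswith line "# Virtualization" then
      pvGoA rest d true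
    else if toggle && PySem.Str.isIn ":" line then
      match PySem.Str.split? line ":" with
      | some [k, v] => pvGoA rest (d.insert (PySem.Str.strip k) (PySem.Str.strip v)) toggle
      | _ => []            -- ValueError on unpacking → 'except: return {}'
    else pvGoA rest d toggle

def get_virtblock_py (basic_env_txt : List String) : List (String × String) :=
  pvGoA basic_env_txt PySem.Dict.empty false

-- ===== PORT B =====
-- Phase 3 of Source B: the dict comprehension over the body's lines containing ':'.
def pvParseB : List String → PySem.Dict String String → List (String × String)
  | [], d => d.items
  | line :: rest, d =>
    if PySem.Str.isIn ":" line then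
      match PySem.Str.splitMax? line ":" 1 with
      | some [k, v] => pvParseB rest (d.insert (PySem.Str.strip k) (PySem.Str.strip v))
      | _ => pvParseB rest d   -- unreachable: split(sep, 1) with sep present gives two pieces
    else pvParseB rest d

def get_virtblock_py_alt (basic_env_txt : List String) : List (String × String) :=
  match basic_env_txt.findIdx? (fun l => PySem.Str.startswith l "# Virtualization") with
  | none => []
  | some i =>
    let body := (basic_env_txt.drop (i + 1)).takeWhile
      (fun l => !PySem.Str.startswith l "#==[")
    pvParseB body PySem.Dict.empty

-- ===== PRECONDITION & SPEC =====
-- On inputs whose section body has a line with ≥2 colons, A returns {} (its bare split unpacking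
-- raises and the blanket except discards everything) while B parses each 'key: value' line with
-- split(':', 1); B's value is the intended parse of such a section.
def D_get_virtblock_py (basic_env_txt : List String) : Prop :=
  ∃ j < basic_env_txt.length, 2 ≤ (basic_env_txt.getD j "").toList.count ':'
    ∧ basic_env_txt.findIdx (PySem.Str.startswith · "# Virtualization") < j
    ∧ ∀ k ≤ j, basic_env_txt.findIdx (PySem.Str.startswith · "# Virtualization") < k →
        PySem.Str.startswith (basic_env_txt.getD k "") "#==[" = false
instance (basic_env_txt : List String) : Decidable (D_get_virtblock_py basic_env_txt) := by
  unfold D_get_virtblock_py; infer_instance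

def Spec_get_virtblock_py (basic_env_txt : List String) (out : List (String × String)) : Prop :=
  ¬ D_get_virtblock_py basic_env_txt → out = get_virtblock_py_alt basic_env_txt
instance (basic_env_txt : List String) (out : List (String × String)) :
    Decidable (Spec_get_virtblock_py basic_env_txt out) := by
  unfold Spec_get_virtblock_py; infer_instance

def pvDiffWitness_get_virtblock_py : List String := ["# Virtualization", "a:b:c"]
def pvDiffWitnessOut_get_virtblock_py : (List (String × String)) × (List (String × String)) :=
  ([], [("a", "b:c")])

-- ===== CLAIM =====
def Claim_unchanged_get_virtblock_py : Prop := ∀ (basic_env_txt : List String),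
  Dom_get_virtblock_py basic_env_txt →
  Spec_get_virtblock_py basic_env_txt (get_virtblock_py basic_env_txt)
def Claim_changed_get_virtblock_py : Prop :=
  Dom_get_virtblock_py (pvDiffWitness_get_virtblock_py) ∧
  D_get_virtblock_py (pvDiffWitness_get_virtblock_py) ∧
  get_virtblock_py (pvDiffWitness_get_virtblock_py) = pvDiffWitnessOut_get_virtblock_py.1 ∧
  get_virtblock_py_alt (pvDiffWitness_get_virtblock_py) = pvDiffWitnessOut_get_virtblock_py.2 ∧
  pvDiffWitnessOut_get_virtblock_py.1 ≠ pvDiffWitnessOut_get_virtblock_py.2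
def Claim_exact_get_virtblock_py : Prop := ∀ (basic_env_txt : List String),
  Dom_get_virtblock_py basic_env_txt → D_get_virtblock_py basic_env_txt →
  get_virtblock_py basic_env_txt ≠ get_virtblock_py_alt basic_env_txt

-- ===== LEMMAS AND PROOFS =====

-- straightforward model of CPython's str.split for a single-char separator
def pvSplitAux (c : Char) (cur : List Char) : List Char → List (List Char)
  | [] => [cur]
  | x :: rest => if x = c then cur :: pvSplitAux c [] rest else pvSplitAux c (cur ++ [x]) rest

def pvSplitAuxMax (c : Char) (m : Nat) (cur : List Char) : List Char → List (List Char)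
  | [] => [cur]
  | x :: rest =>
    if m = 0 then [cur ++ (x :: rest)]
    else if x = c then cur :: pvSplitAuxMax c (m - 1) [] rest
    else pvSplitAuxMax c m (cur ++ [x]) rest

theorem pvSplitOn_go_single (c : Char) (l : List Char) :
    ∀ (fuel : Nat) (cur : List Char) (acc : List (List Char)), l.length ≤ fuel →
    PySem.Chars.splitOn.go [c] fuel l cur acc = acc.reverse ++ pvSplitAux c cur.reverse l := by
  induction l with
  | nil =>
    intro fuel cur acc _
    cases fuel <;> simp [PySem.Chars.splitOn.go, pvSplitAux]
  | cons x rest ih =>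
    intro fuel cur acc hf
    cases fuel with
    | zero => simp at hf
    | succ f =>
      simp only [List.length_cons, Nat.succ_le_succ_iff] at hf
      by_cases hx : x = c
      · subst hx
        rw [PySem.Chars.splitOn.go]
        simp only [List.isPrefixOf, BEq.rfl, Bool.true_and, if_true, List.length_cons,
          List.length_nil, Nat.zero_add, List.drop_succ_cons, List.drop_zero]
        rw [ih f [] (cur.reverse :: acc) hf]
        simp [pvSplitAux]
      · rw [PySem.Chars.splitOn.go]
        have hpre : [c].isPrefixOf (x :: rest) = false := by
          simp [List.isPrefixOf]; exact fun h => absurd h.symm hx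
        rw [hpre]
        simp only [if_false, Bool.false_eq_true]
        rw [ih f (x :: cur) acc hf]
        simp [pvSplitAux, hx]

theorem pvSplitOnMax_go_single (c : Char) (l : List Char) :
    ∀ (fuel m : Nat) (cur : List Char) (acc : List (List Char)), l.length ≤ fuel →
    PySem.Chars.splitOnMax.go [c] fuel m l cur acc = acc.reverse ++ pvSplitAuxMax c m cur.reverse l := by
  induction l with
  | nil =>
    intro fuel m cur acc _
    cases fuel <;> simp [PySem.Chars.splitOnMax.go, pvSplitAuxMax]
  | cons x rest ih =>
    intro fuel m cur acc hf
    cases fuel with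
    | zero => simp at hf
    | succ f =>
      simp only [List.length_cons, Nat.succ_le_succ_iff] at hf
      by_cases hm : m = 0
      · subst hm
        rw [PySem.Chars.splitOnMax.go]
        simp [pvSplitAuxMax]
      · by_cases hx : x = c
        · subst hx
          rw [PySem.Chars.splitOnMax.go]
          simp only [hm, if_false, List.isPrefixOf, BEq.rfl, Bool.true_and, if_true,
            List.length_cons, List.length_nil, Nat.zero_add, List.drop_succ_cons, List.drop_zero]
          rw [ih f (m - 1) [] (cur.reverse :: acc) hf]
          simp [pvSplitAuxMax, hm]
        · rw [PySem.Chars.splitOnMax.go]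
          have hpre : [c].isPrefixOf (x :: rest) = false := by
            simp [List.isPrefixOf]; exact fun h => absurd h.symm hx
          rw [hpre, if_neg hm]
          simp only [if_false, Bool.false_eq_true]
          rw [ih f m (x :: cur) acc hf]
          simp [pvSplitAuxMax, hm, hx]

theorem pvSplitOn_single (c : Char) (l : List Char) :
    PySem.Chars.splitOn l [c] = pvSplitAux c [] l := by
  unfold PySem.Chars.splitOn
  rw [pvSplitOn_go_single c l (l.length + 1) [] [] (by omega)]
  simp

theorem pvSplitOnMax_single (c : Char) (m : Nat) (l : List Char) :
    PySem.Chars.splitOnMax l [c] (m : Int) = pvSplitAuxMax c m [] l := by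
  unfold PySem.Chars.splitOnMax
  rw [if_neg (by omega)]
  rw [pvSplitOnMax_go_single c l (l.length + 1) ((m : Int)).toNat [] [] (by omega)]
  simp

theorem pvSplitAux_length (c : Char) (cur l : List Char) :
    (pvSplitAux c cur l).length = l.count c + 1 := by
  induction l generalizing cur with
  | nil => simp [pvSplitAux]
  | cons x rest ih =>
    by_cases hx : x = c
    · subst hx; simp [pvSplitAux, ih]
    · simp [pvSplitAux, hx, ih]

theorem pvSplitAux_of_count_zero (c : Char) (cur l : List Char) (h : l.count c = 0) :
    pvSplitAux c cur l = [cur ++ l] := by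
  induction l generalizing cur with
  | nil => simp [pvSplitAux]
  | cons x rest ih =>
    simp only [List.count_cons] at h
    by_cases hx : x = c
    · simp [hx] at h
    · simp only [pvSplitAux, if_neg hx]
      rw [ih (cur ++ [x]) (by simpa [hx] using h)]
      simp

theorem pvSplitAuxMax_eq (c : Char) (m : Nat) (cur l : List Char) (h : l.count c ≤ m) :
    pvSplitAuxMax c m cur l = pvSplitAux c cur l := by
  induction l generalizing m cur with
  | nil => simp [pvSplitAuxMax, pvSplitAux]
  | cons x rest ih =>
    simp only [List.count_cons] at h
    by_cases hx : x = c
    · have hm : m ≠ 0 := by simp [hx] at h; omega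
      simp only [pvSplitAuxMax, pvSplitAux, if_neg hm, if_pos hx]
      rw [ih (m - 1) [] (by simp [hx] at h; omega)]
    · by_cases hm : m = 0
      · subst hm
        have h0 : rest.count c = 0 := by simp [hx] at h; omega
        simp only [pvSplitAuxMax, pvSplitAux, if_neg hx]
        rw [pvSplitAux_of_count_zero c (cur ++ [x]) rest h0]
        simp
      · simp only [pvSplitAuxMax, pvSplitAux, if_neg hm, if_neg hx]
        exact ih m (cur ++ [x]) (by simpa [hx] using h)

theorem pvSplitAuxMax_zero (c : Char) (cur l : List Char) :
    pvSplitAuxMax c 0 cur l = [cur ++ l] := by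
  cases l <;> simp [pvSplitAuxMax]

-- ':' in line ↔ ':' ∈ line.toList
theorem pvIsIn_colon (l : List Char) :
    PySem.Chars.isIn [':'] l = true ↔ ':' ∈ l := by
  rw [PySem.Chars.isIn_iff_infix]
  constructor
  · intro h; exact h.mem (by simp)
  · intro h
    obtain ⟨a, b, rfl⟩ := List.append_of_mem h
    exact ⟨a, b, by simp⟩

-- a line with exactly one colon: split(':') = split(':', 1) = [k, v]
theorem pvSplit_eq_of_count_one (line : String) (h : line.toList.count ':' = 1) :
    PySem.Str.split? line ":" = PySem.Str.splitMax? line ":" 1 ∧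
    ∃ k v, PySem.Str.split? line ":" = some [k, v] := by
  have h1 : PySem.Chars.split? line.toList [':'] = some (pvSplitAux ':' [] line.toList) := by
    simp [PySem.Chars.split?, pvSplitOn_single]
  have h2 : PySem.Chars.splitMax? line.toList [':'] 1 = some (pvSplitAux ':' [] line.toList) := by
    simp only [PySem.Chars.splitMax?, List.isEmpty_cons, if_false, Bool.false_eq_true]
    rw [show (1 : Int) = ((1 : Nat) : Int) by norm_num, pvSplitOnMax_single,
      pvSplitAuxMax_eq ':' 1 [] line.toList (by omega)]
  have hst : PySem.Str.split? line ":" = PySem.Str.splitMax? line ":" 1 := by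
    unfold PySem.Str.split? PySem.Str.splitMax?
    rw [show (":".toList) = [':'] from rfl, h1, h2]
  refine ⟨hst, ?_⟩
  have hl : (pvSplitAux ':' [] line.toList).length = 2 := by
    rw [pvSplitAux_length, h]
  match hh : pvSplitAux ':' [] line.toList with
  | [k, v] =>
    refine ⟨String.ofList k, String.ofList v, ?_⟩
    unfold PySem.Str.split?
    rw [show (":".toList) = [':'] from rfl, h1, hh]
    simp
  | [] => rw [hh] at hl; simp at hl
  | [k] => rw [hh] at hl; simp at hl
  | a :: b :: c :: t => rw [hh] at hl; simp at hl

-- a line with ≥ 2 colons: split(':') has ≥ 3 fields, so A's 'some [k,v]' arm never fires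
theorem pvSplit_bad (line : String) (h : 2 ≤ line.toList.count ':') :
    ∃ a b c t, PySem.Str.split? line ":" = some (a :: b :: c :: t) := by
  have h1 : PySem.Chars.split? line.toList [':'] = some (pvSplitAux ':' [] line.toList) := by
    simp [PySem.Chars.split?, pvSplitOn_single]
  have hl : 3 ≤ (pvSplitAux ':' [] line.toList).length := by
    rw [pvSplitAux_length]; omega
  match hh : pvSplitAux ':' [] line.toList with
  | a :: b :: c :: t =>
    refine ⟨String.ofList a, String.ofList b, String.ofList c, t.map String.ofList, ?_⟩
    unfold PySem.Str.split?
    rw [show (":".toList) = [':'] from rfl, h1, hh]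
    simp
  | [] => rw [hh] at hl; simp at hl
  | [k] => rw [hh] at hl; simp at hl
  | [k, v] => rw [hh] at hl; simp at hl

-- a line containing ':': split(':', 1) = [k, v] for some k, v
theorem pvSplitMax_two (line : String) (h : ':' ∈ line.toList) :
    ∃ k v, PySem.Str.splitMax? line ":" 1 = some [k, v] := by
  have h2 : PySem.Chars.splitMax? line.toList [':'] 1 = some (pvSplitAuxMax ':' 1 [] line.toList) := by
    simp only [PySem.Chars.splitMax?, List.isEmpty_cons, if_false, Bool.false_eq_true]
    rw [show (1 : Int) = ((1 : Nat) : Int) by norm_num, pvSplitOnMax_single]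
  have gen : ∀ (cs cur : List Char), ':' ∈ cs → ∃ k v, pvSplitAuxMax ':' 1 cur cs = [k, v] := by
    intro cs
    induction cs with
    | nil => intro cur hmem; simp at hmem
    | cons x rest ih =>
      intro cur hmem
      by_cases hx : x = ':'
      · subst hx
        exact ⟨cur, rest, by simp [pvSplitAuxMax, pvSplitAuxMax_zero]⟩
      · have hm : ':' ∈ rest := by
          rcases List.mem_cons.mp hmem with h' | h'
          · exact absurd h'.symm hx
          · exact h'
        simpa [pvSplitAuxMax, hx] using ih (cur ++ [x]) hm
  obtain ⟨k, v, hkv⟩ := gen line.toList [] h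
  refine ⟨String.ofList k, String.ofList v, ?_⟩
  unfold PySem.Str.splitMax?
  rw [show (":".toList) = [':'] from rfl, h2, hkv]
  simp

theorem pvIsIn_count (line : String) (h : PySem.Chars.isIn [':'] line.toList = true) :
    1 ≤ line.toList.count ':' :=
  List.one_le_count_iff.mpr ((pvIsIn_colon line.toList).mp h)

-- bridge: D_ (an index condition on the input) ↔ the body of the found section has a ≥2-colon line
theorem pvGetD_drop (xs : List String) (i j : Nat) :
    (xs.drop i).getD j "" = xs.getD (i + j) "" := by
  simp [List.getD_eq_getElem?_getD, List.getElem?_drop]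

theorem pvTakeWhileAny (p q : String → Bool) (l : List String) :
    (l.takeWhile p).any q = true ↔
      ∃ m, m < l.length ∧ q (l.getD m "") = true ∧ ∀ k, k ≤ m → p (l.getD k "") = true := by
  induction l with
  | nil => simp
  | cons x rest ih =>
    by_cases hp : p x = true
    · rw [List.takeWhile_cons_of_pos hp]
      simp only [List.any_cons, Bool.or_eq_true, ih]
      constructor
      · rintro (hq | ⟨m, hm, hqm, hall⟩)
        · refine ⟨0, by simp, by simpa using hq, ?_⟩
          intro k hk
          obtain rfl : k = 0 := Nat.le_zero.mp hk
          simpa using hp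
        · refine ⟨m + 1, by simp; omega, by simpa using hqm, ?_⟩
          intro k hk
          cases k with
          | zero => simpa using hp
          | succ k' => simpa using hall k' (by omega)
      · rintro ⟨m, hm, hqm, hall⟩
        cases m with
        | zero => exact Or.inl (by simpa using hqm)
        | succ m' =>
          refine Or.inr ⟨m', by simp at hm; omega, by simpa using hqm, ?_⟩
          intro k hk
          simpa using hall (k + 1) (by omega)
    · rw [List.takeWhile_cons_of_neg (by simp [hp])]
      simp only [List.any_nil, Bool.false_eq_true, false_iff]
      rintro ⟨m, hm, hqm, hall⟩
      have h0 := hall 0 (Nat.zero_le m)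
      simp [hp] at h0

theorem pvD_findIdx (xs : List String) (h : D_get_virtblock_py xs) :
    ∃ i, xs.findIdx? (fun l => PySem.Str.startswith l "# Virtualization") = some i := by
  obtain ⟨j, hj, _, hij, _⟩ := h
  exact ⟨_, List.findIdx?_eq_some_iff_findIdx_eq.mpr ⟨by omega, rfl⟩⟩

theorem pvD_iff_any (xs : List String) (i : Nat)
    (hfi : xs.findIdx? (fun l => PySem.Str.startswith l "# Virtualization") = some i) :
    D_get_virtblock_py xs ↔
      ((xs.drop (i + 1)).takeWhile (fun l => !PySem.Str.startswith l "#==[")).any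
        (fun l => 2 ≤ l.toList.count ':') = true := by
  obtain ⟨hi, hfind⟩ := List.findIdx?_eq_some_iff_findIdx_eq.mp hfi
  have hfind' : xs.findIdx (PySem.Str.startswith · "# Virtualization") = i := hfind
  constructor
  · rintro ⟨j, hj, hcnt, hij, hbound⟩
    rw [hfind'] at hij hbound
    rw [pvTakeWhileAny]
    refine ⟨j - (i + 1), by rw [List.length_drop]; omega, ?_, ?_⟩
    · rw [pvGetD_drop, show i + 1 + (j - (i + 1)) = j by omega]
      simpa using hcnt
    · intro k hk
      rw [pvGetD_drop]
      simpa using hbound (i + 1 + k) (by omega) (by omega)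
  · intro h
    obtain ⟨m, hm, hqm, hall⟩ := (pvTakeWhileAny _ _ _).mp h
    rw [List.length_drop] at hm
    refine ⟨i + 1 + m, by omega, ?_, by omega, ?_⟩
    · rw [← pvGetD_drop]; simpa using hqm
    · intro k hk1 hk2
      rw [hfind'] at hk2
      have := hall (k - (i + 1)) (by omega)
      rw [pvGetD_drop, show i + 1 + (k - (i + 1)) = k by omega] at this
      simpa using this

-- Once toggle is on and no body line has ≥2 colons, A's remaining loop equals B's parse of the body.
theorem pvGoA_true (xs : List String) (d : PySem.Dict String String)
    (hgood : ∀ l ∈ xs.takeWhile (fun l => !PySem.Str.startswith l "#==["), l.toList.count ':' ≤ 1) :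
    pvGoA xs d true
      = pvParseB (xs.takeWhile (fun l => !PySem.Str.startswith l "#==[")) d := by
  induction xs generalizing d with
  | nil => simp [pvGoA, pvParseB]
  | cons line rest ih =>
    by_cases hb : PySem.Chars.startswith line.toList ['#', '=', '=', '['] = true
    · simp [pvGoA, pvParseB, hb]
    · rw [Bool.not_eq_true] at hb
      have htw : (line :: rest).takeWhile (fun l => !PySem.Str.startswith l "#==[")
          = line :: rest.takeWhile (fun l => !PySem.Str.startswith l "#==[") := by
        rw [List.takeWhile_cons]; simp [hb]
      have hline := hgood line (htw ▸ List.mem_cons_self)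
      have hrest : ∀ l ∈ rest.takeWhile (fun l => !PySem.Str.startswith l "#==["),
          l.toList.count ':' ≤ 1 := by
        intro l hl
        exact hgood l (htw ▸ List.mem_cons_of_mem line hl)
      by_cases hc : PySem.Chars.isIn [':'] line.toList = true
      · have hone : line.toList.count ':' = 1 := by
          have := pvIsIn_count line hc; omega
        obtain ⟨heq, k, v, hkv⟩ := pvSplit_eq_of_count_one line hone
        have hkv2 : PySem.Str.splitMax? line ":" 1 = some [k, v] := heq ▸ hkv
        simp [pvGoA, pvParseB, hb, hc, hkv, hkv2, ih _ hrest]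
      · rw [Bool.not_eq_true] at hc
        simp [pvGoA, pvParseB, hb, hc, ih _ hrest]

-- Before the header, A does nothing; finding the header index is B's phase 1.
theorem pvGoA_false (xs : List String) (d : PySem.Dict String String) :
    pvGoA xs d false
      = match xs.findIdx? (fun l => PySem.Str.startswith l "# Virtualization") with
        | none => d.items
        | some i => pvGoA (xs.drop (i + 1)) d true := by
  induction xs generalizing d with
  | nil => simp [pvGoA]
  | cons line rest ih =>
    by_cases hh : PySem.Chars.startswith line.toList
        ['#', ' ', 'V', 'i', 'r', 't', 'u', 'a', 'l', 'i', 'z', 'a', 't', 'i', 'o', 'n'] = true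
    · simp [pvGoA, hh, List.findIdx?_cons]
    · rw [Bool.not_eq_true] at hh
      rw [show pvGoA (line :: rest) d false = pvGoA rest d false by
        simp [pvGoA, hh]]
      rw [ih]
      rw [List.findIdx?_cons]
      cases h : rest.findIdx? (fun l => PySem.Str.startswith l "# Virtualization") with
      | none => simp [hh]
      | some i => simp [hh, List.drop_succ_cons]

-- tightness helpers: A dies on the first ≥2-colon body line; B's dict is nonempty there
theorem pvGoA_true_bad (xs : List String) (d : PySem.Dict String String)
    (hbad : (xs.takeWhile (fun l => !PySem.Str.startswith l "#==[")).any
      (fun l => 2 ≤ l.toList.count ':') = true) :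
    pvGoA xs d true = [] := by
  induction xs generalizing d with
  | nil => simp at hbad
  | cons line rest ih =>
    by_cases hb : PySem.Chars.startswith line.toList ['#', '=', '=', '['] = true
    · simp [hb] at hbad
    · rw [Bool.not_eq_true] at hb
      rw [show (line :: rest).takeWhile (fun l => !PySem.Str.startswith l "#==[")
          = line :: rest.takeWhile (fun l => !PySem.Str.startswith l "#==[") by
        simp [hb]] at hbad
      simp only [List.any_cons, Bool.or_eq_true, decide_eq_true_eq] at hbad
      rcases hbad with hline | hrest
      · have hmem : ':' ∈ line.toList := List.one_le_count_iff.mp (by omega)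
        have hc : PySem.Chars.isIn [':'] line.toList = true :=
          (pvIsIn_colon line.toList).mpr hmem
        obtain ⟨a, b, c, t, habc⟩ := pvSplit_bad line hline
        simp [pvGoA, hb, hc, habc]
      · by_cases hc : PySem.Chars.isIn [':'] line.toList = true
        · cases hkv : PySem.Str.split? line ":" with
          | none => simp [pvGoA, hb, hc, hkv]
          | some l =>
            match l with
            | [] => simp [pvGoA, hb, hc, hkv]
            | [k] => simp [pvGoA, hb, hc, hkv]
            | [k, v] => simp [pvGoA, hb, hc, hkv, ih _ hrest]
            | a :: bb :: cc :: t => simp [pvGoA, hb, hc, hkv]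
        · rw [Bool.not_eq_true] at hc
          simp [pvGoA, hb, hc, ih _ hrest]

theorem pvInsert_ne_nil (d : PySem.Dict String String) (k v : String) :
    (d.insert k v).items ≠ [] := by
  unfold PySem.Dict.insert
  by_cases h : d.contains k = true
  · simp only [h, if_true]
    unfold PySem.Dict.contains at h
    cases hd : d.items with
    | nil => rw [hd] at h; simp at h
    | cons p t => simp
  · simp [h]

theorem pvParseB_pres (xs : List String) (d : PySem.Dict String String)
    (h : d.items ≠ []) : pvParseB xs d ≠ [] := by
  induction xs generalizing d with
  | nil => simpa [pvParseB] using h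
  | cons line rest ih =>
    by_cases hc : PySem.Str.isIn ":" line = true
    · cases hkv : PySem.Str.splitMax? line ":" 1 with
      | none => simp only [pvParseB, hc, if_true, hkv]; exact ih d h
      | some l =>
        match l with
        | [] => simp only [pvParseB, hc, if_true, hkv]; exact ih d h
        | [k] => simp only [pvParseB, hc, if_true, hkv]; exact ih d h
        | [k, v] =>
          simp only [pvParseB, hc, if_true, hkv]
          exact ih _ (pvInsert_ne_nil d _ _)
        | a :: b :: c :: t => simp only [pvParseB, hc, if_true, hkv]; exact ih d h
    · rw [Bool.not_eq_true] at hc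
      simp only [pvParseB, hc, Bool.false_eq_true, if_false]
      exact ih d h

theorem pvParseB_bad_ne_nil (xs : List String) (d : PySem.Dict String String)
    (hbad : xs.any (fun l => 2 ≤ l.toList.count ':') = true) :
    pvParseB xs d ≠ [] := by
  induction xs generalizing d with
  | nil => simp at hbad
  | cons line rest ih =>
    simp only [List.any_cons, Bool.or_eq_true, decide_eq_true_eq] at hbad
    by_cases hc : PySem.Str.isIn ":" line = true
    · cases hkv : PySem.Str.splitMax? line ":" 1 with
      | none =>
        simp only [pvParseB, hc, if_true, hkv]
        rcases hbad with hline | hrest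
        · obtain ⟨k, v, hkv'⟩ := pvSplitMax_two line (List.one_le_count_iff.mp (by omega))
          rw [hkv'] at hkv; simp at hkv
        · exact ih d (by simpa using hrest)
      | some l =>
        match l with
        | [k, v] =>
          simp only [pvParseB, hc, if_true, hkv]
          exact pvParseB_pres rest _ (pvInsert_ne_nil d _ _)
        | [] =>
          simp only [pvParseB, hc, if_true, hkv]
          rcases hbad with hline | hrest
          · obtain ⟨k, v, hkv'⟩ := pvSplitMax_two line (List.one_le_count_iff.mp (by omega))
            rw [hkv'] at hkv; simp at hkv
          · exact ih d (by simpa using hrest)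
        | [k] =>
          simp only [pvParseB, hc, if_true, hkv]
          rcases hbad with hline | hrest
          · obtain ⟨k', v', hkv'⟩ := pvSplitMax_two line (List.one_le_count_iff.mp (by omega))
            rw [hkv'] at hkv; simp at hkv
          · exact ih d (by simpa using hrest)
        | a :: b :: c :: t =>
          simp only [pvParseB, hc, if_true, hkv]
          rcases hbad with hline | hrest
          · obtain ⟨k', v', hkv'⟩ := pvSplitMax_two line (List.one_le_count_iff.mp (by omega))
            rw [hkv'] at hkv; simp at hkv
          · exact ih d (by simpa using hrest)
    · rw [Bool.not_eq_true] at hc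
      have hline0 : ¬ 2 ≤ line.toList.count ':' := by
        intro h2
        have hmem : ':' ∈ line.toList := List.one_le_count_iff.mp (by omega)
        have hc' : PySem.Str.isIn ":" line = true := by
          simp only [PySem.Str.isIn_eq]
          exact (pvIsIn_colon line.toList).mpr hmem
        rw [hc'] at hc; simp at hc
      simp only [pvParseB, hc, Bool.false_eq_true, if_false]
      rcases hbad with hline | hrest
      · exact absurd hline hline0
      · exact ih d (by simpa using hrest)

-- ===== VERDICT =====
theorem get_virtblock_py_spec : Claim_unchanged_get_virtblock_py := by
  intro xs _ hD
  unfold get_virtblock_py get_virtblock_py_alt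
  rw [pvGoA_false]
  cases h : xs.findIdx? (fun l => PySem.Str.startswith l "# Virtualization") with
  | none => simp [PySem.Dict.empty]
  | some i =>
    have hany : ¬ ((xs.drop (i + 1)).takeWhile (fun l => !PySem.Str.startswith l "#==[")).any
        (fun l => 2 ≤ l.toList.count ':') = true := fun hb => hD ((pvD_iff_any xs i h).mpr hb)
    rw [Bool.not_eq_true, List.any_eq_false] at hany
    have hgood : ∀ l ∈ ((xs.drop (i + 1)).takeWhile (fun l => !PySem.Str.startswith l "#==[")),
        l.toList.count ':' ≤ 1 := by
      intro l hl
      have := hany l hl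
      simp at this
      omega
    exact pvGoA_true _ _ hgood

theorem get_virtblock_py_changed : Claim_changed_get_virtblock_py := by
  unfold Claim_changed_get_virtblock_py; decide

theorem get_virtblock_py_tight : Claim_exact_get_virtblock_py := by
  intro xs _ hD
  unfold get_virtblock_py get_virtblock_py_alt
  rw [pvGoA_false]
  obtain ⟨i, hfi⟩ := pvD_findIdx xs hD
  have hbad := (pvD_iff_any xs i hfi).mp hD
  rw [hfi]
  show pvGoA (xs.drop (i + 1)) PySem.Dict.empty true
      ≠ pvParseB ((xs.drop (i + 1)).takeWhile (fun l => !PySem.Str.startswith l "#==["))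
          PySem.Dict.empty
  rw [pvGoA_true_bad _ _ hbad]
  exact fun hcontra => pvParseB_bad_ne_nil
    ((xs.drop (i + 1)).takeWhile (fun l => !PySem.Str.startswith l "#==["))
    PySem.Dict.empty hbad hcontra.symm
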